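-- pv_equiv track=rewrite | github.com/kyupkyup/algorithms | 11497 통나무 건너뛰기2/11497 통나무 건너뛰기2/_11497_통나무_건너뛰기2.py | solution
-- ===== SOURCE A (Python) =====
-- from collections import deque
--
-- def solution(n, arr):
--     dq = deque()
--     arr.sort()
--     num = 0
--
--     for i in range(n-1, -1, -1):
--         if i%2 == 1:
--             dq.append(arr[i])
--         elif i%2 == 0:
--             dq.appendleft(arr[i])
--
--
--     if abs(dq[0] - dq[n-1]) > num:
--         num = abs(dq[0] - dq[n-1])
--     for j in range(1,n):
--         if abs(dq[j] - dq[j-1]) > num: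
--             num = abs(dq[j] - dq[j-1])
--
--         if num == 0:
--             break
--
--
--     return num
-- ===== SOURCE B (Python) =====
-- def solution(n, arr):
--     # Max adjacent difference in the zigzag circular arrangement of the n smallest,
--     # computed directly from the sorted array: the arrangement's adjacent gaps are
--     # exactly arr[1]-arr[0], arr[n-1]-arr[n-2] and arr[i+2]-arr[i] for 0 <= i <= n-3.
--     # Sorts arr in place like the original.
--     arr.sort()
--     if n <= 1:
--         return 0
--     best = max(arr[1] - arr[0], arr[n-1] - arr[n-2])
--     for i in range(n - 2):
--         if arr[i+2] - arr[i] > best: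
--             best = arr[i+2] - arr[i]
--     return best
-- ===== Notes on version B (the rewrite author's own statement) =====
-- stated objective: faster
-- what changed: Instead of materialising the zigzag deque and scanning its adjacent pairs by random-access deque indexing with an early-break, B reads the arrangement's gap set straight off the sorted array (arr[i+2]-arr[i] plus the two boundary gaps) in one pass.
-- intended difference: When the three smallest of the n chosen values are equal but not all n are equal, A's 'if num == 0: break' fires on the first two zero gaps and A wrongly returns 0, while B returns the true maximum adjacent gap, which is what the problem asks for. — e.g. on solution(4, [0, 0, 0, 1]): A returns 0, B returns 1
import Mathlib
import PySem

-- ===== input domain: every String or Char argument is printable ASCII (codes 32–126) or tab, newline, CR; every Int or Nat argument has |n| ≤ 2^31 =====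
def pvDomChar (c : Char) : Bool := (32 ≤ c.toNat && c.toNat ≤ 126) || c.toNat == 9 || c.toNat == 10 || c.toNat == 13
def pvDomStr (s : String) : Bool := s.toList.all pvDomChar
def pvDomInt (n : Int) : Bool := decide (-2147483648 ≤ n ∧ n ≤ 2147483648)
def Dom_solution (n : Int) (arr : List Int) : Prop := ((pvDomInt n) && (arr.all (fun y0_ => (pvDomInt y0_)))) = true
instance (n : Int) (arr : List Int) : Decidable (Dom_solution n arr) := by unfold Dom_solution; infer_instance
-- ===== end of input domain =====

-- B reads the zigzag arrangement's gap set straight off the sorted array instead of building a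
-- deque, and has no early 'break' (A's break is a bug, documented in D_solution below).
-- Python note: both A and B sort arr in place; the equivalence proved here is about the return value.

-- ===== PORT A =====
-- the 'for j in range(1, n)' loop with its 'if num == 0: break'
def solutionLoop (dq : List Int) : Int → List Int → Int
  | num, [] => num
  | num, j :: t =>
    let g := |(PySem.List.pyGet? dq j).getD 0 - (PySem.List.pyGet? dq (j-1)).getD 0|
    let num' := if g > num then g else num
    if num' == 0 then num' else solutionLoop dq num' t

def solution (n : Int) (arr : List Int) : Int :=
  let s := PySem.List.sorted arr (fun x => x) false
  let dq : List Int := (PySem.List.pyRange (n-1) (-1) (-1)).foldl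
    (fun dq i =>
      if PySem.Int.mod i 2 == 1 then dq ++ [(PySem.List.pyGet? s i).getD 0]
      else if PySem.Int.mod i 2 == 0 then (PySem.List.pyGet? s i).getD 0 :: dq
      else dq) []
  let num : Int := 0
  let num := if |(PySem.List.pyGet? dq 0).getD 0 - (PySem.List.pyGet? dq (n-1)).getD 0| > num
             then |(PySem.List.pyGet? dq 0).getD 0 - (PySem.List.pyGet? dq (n-1)).getD 0| else num
  solutionLoop dq num (PySem.List.pyRange 1 n 1)

-- ===== PORT B =====
def solution_alt (n : Int) (arr : List Int) : Int :=
  let s := PySem.List.sorted arr (fun x => x) false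
  if n ≤ 1 then 0
  else
    let best := max ((PySem.List.pyGet? s 1).getD 0 - (PySem.List.pyGet? s 0).getD 0)
                    ((PySem.List.pyGet? s (n-1)).getD 0 - (PySem.List.pyGet? s (n-2)).getD 0)
    (PySem.List.pyRange 0 (n-2) 1).foldl
      (fun best i =>
        if (PySem.List.pyGet? s (i+2)).getD 0 - (PySem.List.pyGet? s i).getD 0 > best
        then (PySem.List.pyGet? s (i+2)).getD 0 - (PySem.List.pyGet? s i).getD 0 else best) best

-- ===== PRECONDITION & SPEC =====
-- exactly the inputs on which the Python A returns (otherwise dq[0]/arr[i] raises IndexError)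
def Pre_solution (n : Int) (arr : List Int) : Prop := 1 ≤ n ∧ n ≤ arr.length
instance (n : Int) (arr : List Int) : Decidable (Pre_solution n arr) := by unfold Pre_solution; infer_instance
def pvWitness_solution : Int × List Int := (3, [5, 1, 9])

-- On inputs whose three smallest chosen values are equal while not all n of them are equal, A's
-- 'if num == 0: break' fires on the first two zero gaps and A wrongly returns 0, while B returns
-- the true maximum adjacent gap of the arrangement, which is what the problem asks for.
def D_solution (n : Int) (arr : List Int) : Prop :=
  let s := PySem.List.sorted arr (fun x => x) false
  3 ≤ n ∧ n ≤ arr.length ∧ s.getD 1 0 = s.getD 0 0 ∧ s.getD 2 0 = s.getD 0 0 ∧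
    ∃ k ∈ List.range n.toNat, s.getD k 0 ≠ s.getD 0 0
instance (n : Int) (arr : List Int) : Decidable (D_solution n arr) := by unfold D_solution; infer_instance

def Spec_solution (n : Int) (arr : List Int) (out : Int) : Prop := ¬ D_solution n arr → out = solution_alt n arr
instance (n : Int) (arr : List Int) (out : Int) : Decidable (Spec_solution n arr out) := by unfold Spec_solution; infer_instance

def pvDiffWitness_solution : Int × List Int := (4, [0, 0, 0, 1])
def pvDiffWitnessOut_solution : Int × Int := (0, 1)

-- ===== CLAIM (what is proved, stated in full; the proofs are below) =====
def Claim_unchanged_solution : Prop := ∀ (n : Int) (arr : List Int), Dom_solution n arr → Pre_solution n arr → Spec_solution n arr (solution n arr)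
def Claim_changed_solution : Prop := Dom_solution (pvDiffWitness_solution.1) (pvDiffWitness_solution.2) ∧ Pre_solution (pvDiffWitness_solution.1) (pvDiffWitness_solution.2) ∧ D_solution (pvDiffWitness_solution.1) (pvDiffWitness_solution.2) ∧ solution (pvDiffWitness_solution.1) (pvDiffWitness_solution.2) = pvDiffWitnessOut_solution.1 ∧ solution_alt (pvDiffWitness_solution.1) (pvDiffWitness_solution.2) = pvDiffWitnessOut_solution.2 ∧ pvDiffWitnessOut_solution.1 ≠ pvDiffWitnessOut_solution.2
def Claim_exact_solution : Prop := ∀ (n : Int) (arr : List Int), Dom_solution n arr → Pre_solution n arr → D_solution n arr → solution n arr ≠ solution_alt n arr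

-- ===== LEMMAS AND PROOFS =====

-- proof-only shorthands: B's gap formula, and the zigzag deque A builds
-- (dqL = evens of the sorted prefix ascending, then odds descending)
def gapF (s : List Int) (i : Nat) : Int := s.getD (i+2) 0 - s.getD i 0
def evensL (s : List Int) (N : Nat) : List Int := (List.range ((N+1)/2)).map (fun t => s.getD (2*t) 0)
def oddsL (s : List Int) (N : Nat) : List Int := (List.range (N/2)).map (fun t => s.getD (2*t+1) 0)
def dqL (s : List Int) (N : Nat) : List Int := evensL s N ++ (oddsL s N).reverse
def gA (s : List Int) (N : Nat) (k : Nat) : Int := |(dqL s N).getD (k+1) 0 - (dqL s N).getD k 0|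
def amax (s : List Int) (N : Nat) : Int :=
  (List.range (N-1)).foldl (fun a k => max a (gA s N k)) (max 0 (s.getD 1 0 - s.getD 0 0))
def bmax (s : List Int) (N : Nat) : Int :=
  (List.range (N-2)).foldl (fun a k => max a (gapF s k))
    (max (s.getD 1 0 - s.getD 0 0) (s.getD (N-1) 0 - s.getD (N-2) 0))

theorem if_gt_eq_max (a b : Int) : (if b > a then b else a) = max a b := by
  rcases Int.lt_or_le a b with h | h <;> simp [max_def] <;> omega

theorem foldl_max_le {α : Type} (xs : List α) (f : α → Int) (init c : Int)
    (h0 : init ≤ c) (h : ∀ x ∈ xs, f x ≤ c) :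
    xs.foldl (fun a x => max a (f x)) init ≤ c := by
  induction xs generalizing init with
  | nil => simpa using h0
  | cons y t ih =>
    simp only [List.foldl_cons]
    exact ih _ (max_le h0 (h y (by simp))) (fun x hx => h x (List.mem_cons_of_mem y hx))

theorem filter_even_range (m : Nat) :
    (List.range m).filter (fun i => i % 2 == 0) = (List.range ((m+1)/2)).map (fun t => 2*t) := by
  induction m with
  | zero => simp
  | succ m ih =>
    rw [List.range_succ, List.filter_append, ih]
    rcases Nat.even_or_odd m with ⟨t, ht⟩ | ⟨t, ht⟩
    · have h2 : (m+1+1)/2 = (m+1)/2 + 1 := by omega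
      have h3 : (m+1)/2 = t := by omega
      simp [List.filter, show m % 2 = 0 by omega, h2, List.range_succ, h3]
      omega
    · have h2 : (m+1+1)/2 = (m+1)/2 := by omega
      simp [List.filter, show m % 2 = 1 by omega, h2]

theorem filter_odd_range (m : Nat) :
    (List.range m).filter (fun i => i % 2 == 1) = (List.range (m/2)).map (fun t => 2*t+1) := by
  induction m with
  | zero => simp
  | succ m ih =>
    rw [List.range_succ, List.filter_append, ih]
    rcases Nat.even_or_odd m with ⟨t, ht⟩ | ⟨t, ht⟩
    · have h2 : (m+1)/2 = m/2 := by omega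
      simp [List.filter, show m % 2 = 0 by omega, h2]
    · have h2 : (m+1)/2 = m/2 + 1 := by omega
      have h3 : m/2 = t := by omega
      simp [List.filter, show m % 2 = 1 by omega, h2, List.range_succ, h3]
      omega

theorem dq_inv (s : List Int) (N : Nat) (m : Nat) : ∀ (k : Nat), k + m = N →
    (PySem.List.pyRange ((N:Int)-1) ((k:Int)-1) (-1)).foldl
      (fun dq i =>
        if PySem.Int.mod i 2 == 1 then dq ++ [(PySem.List.pyGet? s i).getD 0]
        else if PySem.Int.mod i 2 == 0 then (PySem.List.pyGet? s i).getD 0 :: dq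
        else dq) []
    = ((List.range' k m).filter (fun i => i % 2 == 0)).map (fun i => s.getD i 0)
      ++ (((List.range' k m).filter (fun i => i % 2 == 1)).map (fun i => s.getD i 0)).reverse := by
  induction m with
  | zero =>
    intro k hk
    rw [PySem.List.pyRange_neg_one_eq_nil (by omega)]
    simp
  | succ m ih =>
    intro k hk
    have hrw : PySem.List.pyRange ((N:Int)-1) ((k:Int)-1) (-1)
        = PySem.List.pyRange ((N:Int)-1) (((k+1:Nat):Int)-1) (-1) ++ [(k:Int)] := by
      rw [PySem.List.pyRange_neg_one_eq_reverse, PySem.List.pyRange_neg_one_eq_reverse]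
      rw [show ((k:Int)-1+1) = ((k:Nat):Int) by omega]
      rw [show (((k+1:Nat):Int)-1+1) = ((k:Nat):Int)+1 by push_cast; omega]
      rw [PySem.List.pyRange_one_cons (by omega)]
      simp
    rw [hrw, List.foldl_append, ih (k+1) (by omega)]
    have hmod : PySem.Int.mod (k:Int) 2 = ((k % 2 : Nat) : Int) := by
      exact_mod_cast PySem.Int.mod_natCast k 2
    have hget : (PySem.List.pyGet? s (k:Int)).getD 0 = s.getD k 0 := by
      rw [PySem.List.pyGet?_natCast, List.getD_eq_getElem?_getD]
    have hr : List.range' k (m+1) = k :: List.range' (k+1) m := List.range'_succ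
    rcases Nat.even_or_odd k with ⟨t, ht⟩ | ⟨t, ht⟩
    · simp only [List.foldl_cons, List.foldl_nil, hmod, hget, show k % 2 = 0 by omega]
      norm_num
      rw [hr]
      simp [show k % 2 = 0 by omega]
    · simp only [List.foldl_cons, List.foldl_nil, hmod, hget, show k % 2 = 1 by omega]
      norm_num
      rw [hr]
      simp [show k % 2 = 1 by omega]

theorem dq_build (s : List Int) (N : Nat) :
    (PySem.List.pyRange ((N:Int)-1) (-1) (-1)).foldl
      (fun dq i =>
        if PySem.Int.mod i 2 == 1 then dq ++ [(PySem.List.pyGet? s i).getD 0]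
        else if PySem.Int.mod i 2 == 0 then (PySem.List.pyGet? s i).getD 0 :: dq
        else dq) []
    = dqL s N := by
  have h := dq_inv s N N 0 (by omega)
  rw [show ((0:Nat):Int)-1 = -1 by norm_num] at h
  rw [h, ← List.range_eq_range', filter_even_range, filter_odd_range]
  simp [dqL, evensL, oddsL, List.map_map, Function.comp_def]

theorem dq_getD (s : List Int) (N : Nat) (j : Nat) (hj : j < N) :
    (dqL s N).getD j 0 = if 2*j+1 ≤ N then s.getD (2*j) 0 else s.getD (2*(N-1-j)+1) 0 := by
  have hlE : (evensL s N).length = (N+1)/2 := by simp [evensL]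
  have hlO : ((oddsL s N).reverse).length = N/2 := by simp [oddsL]
  have hjlen : j < (dqL s N).length := by simp [dqL, evensL, oddsL]; omega
  rw [List.getD_eq_getElem _ _ hjlen]
  have hdq : (dqL s N)[j] = (evensL s N ++ (oddsL s N).reverse)[j]'(by simpa [dqL] using hjlen) := by
    simp [dqL]
  rw [hdq]
  rcases le_or_gt (2*j+1) N with hcase | hcase
  · have hjE : j < (evensL s N).length := by omega
    rw [if_pos hcase, List.getElem_append_left hjE]
    simp only [evensL, List.getElem_map, List.getElem_range]
  · rw [if_neg (by omega), List.getElem_append_right (by omega)]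
    rw [List.getElem_reverse]
    simp only [oddsL, List.getElem_map, List.getElem_range, List.length_map, List.length_range, hlE]
    have : N / 2 - 1 - (j - (N+1)/2) = N - 1 - j := by omega
    rw [this, List.getD_eq_getElem?_getD]

theorem sorted_mono (arr : List Int) (p q : Nat) (hpq : p ≤ q)
    (hq : q < (PySem.List.sorted arr (fun x => x) false).length) :
    (PySem.List.sorted arr (fun x => x) false).getD p 0
      ≤ (PySem.List.sorted arr (fun x => x) false).getD q 0 := by
  rw [List.getD_eq_getElem _ _ (by omega), List.getD_eq_getElem _ _ hq]
  exact PySem.List.sorted_id_getElem_mono arr hpq hq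

theorem gA_eq (s : List Int) (N : Nat)
    (hmono : ∀ p q : Nat, p ≤ q → q < s.length → s.getD p 0 ≤ s.getD q 0)
    (hlen : N ≤ s.length) (k : Nat) (hk : k < N-1) :
    gA s N k = if 2*k+3 ≤ N then gapF s (2*k)
               else if 2*k+1 ≤ N then s.getD (N-1) 0 - s.getD (N-2) 0
               else gapF s (2*N-2*k-3) := by
  unfold gA
  rw [dq_getD s N (k+1) (by omega), dq_getD s N k (by omega)]
  rcases le_or_gt (2*k+3) N with h1 | h1
  · rw [if_pos (by omega), if_pos (by omega), if_pos h1]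
    rw [abs_of_nonneg (by have := hmono (2*k) (2*(k+1)) (by omega) (by omega); omega),
      show 2*(k+1) = 2*k+2 from by omega]
    unfold gapF
    omega
  · rcases le_or_gt (2*k+1) N with h2 | h2
    · rw [if_neg (by omega), if_pos (by omega), if_neg (by omega), if_pos h2]
      rcases (by omega : 2*k+2 = N ∨ 2*k+1 = N) with h3 | h3
      · have e1 : 2*(N-1-(k+1))+1 = N-1 := by omega
        have e2 : 2*k = N-2 := by omega
        rw [e1, e2, abs_of_nonneg (by have := hmono (N-2) (N-1) (by omega) (by omega); omega)]
      · have e1 : 2*(N-1-(k+1))+1 = N-2 := by omega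
        have e2 : 2*k = N-1 := by omega
        rw [e1, e2, abs_of_nonpos (by have := hmono (N-2) (N-1) (by omega) (by omega); omega)]
        omega
    · rw [if_neg (by omega), if_neg (by omega), if_neg (by omega), if_neg (by omega)]
      have e1 : 2*(N-1-(k+1))+1 = 2*N-2*k-3 := by omega
      have e2 : 2*(N-1-k)+1 = (2*N-2*k-3)+2 := by omega
      rw [e1, e2]
      rw [abs_of_nonpos (by have := hmono (2*N-2*k-3) (2*N-2*k-3+2) (by omega) (by omega); omega)]
      unfold gapF
      omega

theorem amax_eq_bmax (s : List Int) (N : Nat)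
    (hmono : ∀ p q : Nat, p ≤ q → q < s.length → s.getD p 0 ≤ s.getD q 0)
    (hlen : N ≤ s.length) (hN : 3 ≤ N) :
    amax s N = bmax s N := by
  have hb1 : 0 ≤ s.getD 1 0 - s.getD 0 0 := by
    have := hmono 0 1 (by omega) (by omega); omega
  have hAle := PySem.List.le_foldl_max_int (List.range (N-1)) (gA s N)
      (max 0 (s.getD 1 0 - s.getD 0 0))
  have hBle := PySem.List.le_foldl_max_int (List.range (N-2)) (gapF s)
      (max (s.getD 1 0 - s.getD 0 0) (s.getD (N-1) 0 - s.getD (N-2) 0))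
  apply le_antisymm
  · apply foldl_max_le
    · exact max_le (le_trans (le_trans hb1 (le_max_left _ _)) hBle.1)
        (le_trans (le_max_left _ _) hBle.1)
    · intro k hk
      rw [List.mem_range] at hk
      rw [gA_eq s N hmono hlen k hk]
      split_ifs with h1 h2
      · exact hBle.2 _ (List.mem_range.mpr (by omega))
      · exact le_trans (le_max_right _ _) hBle.1
      · exact hBle.2 _ (List.mem_range.mpr (by omega))
  · apply foldl_max_le
    · apply max_le
      · exact le_trans (le_max_right _ _) hAle.1
      · have hj : ((N-1)/2) < N-1 := by omega
        have := hAle.2 ((N-1)/2) (List.mem_range.mpr hj)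
        rw [gA_eq s N hmono hlen _ hj] at this
        rw [if_neg (by omega), if_pos (by omega)] at this
        exact this
    · intro i hi
      rw [List.mem_range] at hi
      rcases Nat.even_or_odd i with ⟨t, ht⟩ | ⟨t, ht⟩
      · have hj : t < N-1 := by omega
        have := hAle.2 t (List.mem_range.mpr hj)
        rw [gA_eq s N hmono hlen _ hj, if_pos (by omega)] at this
        rw [show 2*t = i by omega] at this
        exact this
      · have hj : (N-2-t) < N-1 := by omega
        have := hAle.2 (N-2-t) (List.mem_range.mpr hj)
        rw [gA_eq s N hmono hlen _ hj, if_neg (by omega), if_neg (by omega)] at this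
        rw [show 2*N-2*(N-2-t)-3 = i by omega] at this
        exact this

theorem loop_fold (dq : List Int) (t : List Nat) : ∀ (num : Int), 0 < num →
    solutionLoop dq num (t.map (fun k => ((1+k : Nat) : Int)))
      = t.foldl (fun a k => max a (|dq.getD (k+1) 0 - dq.getD k 0|)) num := by
  induction t with
  | nil => intro num h; simp [solutionLoop]
  | cons k tl ih =>
    intro num h
    simp only [List.map_cons, List.foldl_cons]
    rw [solutionLoop]
    simp only [PySem.List.pyGet?_natCast,
      show ((1+k : Nat) : Int) - 1 = ((k : Nat) : Int) by push_cast; omega,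
      PySem.List.pyGet?_natCast]
    rw [show (1+k) = k+1 by omega]
    rw [← List.getD_eq_getElem?_getD, ← List.getD_eq_getElem?_getD, if_gt_eq_max]
    have h' : 0 < max num (|dq.getD (k+1) 0 - dq.getD k 0|) := lt_max_iff.mpr (Or.inl h)
    rw [if_neg (by simpa using h'.ne')]
    exact ih _ h'

theorem sol_unfold (n : Int) (arr : List Int) (N : Nat) (hN : n.toNat = N) (h2 : 2 ≤ N)
    (hlen : n ≤ arr.length) :
    solution n arr
      = solutionLoop (dqL (PySem.List.sorted arr (fun x => x) false) N)
          (max 0 ((PySem.List.sorted arr (fun x => x) false).getD 1 0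
                  - (PySem.List.sorted arr (fun x => x) false).getD 0 0))
          ((List.range (N-1)).map (fun k => ((1+k : Nat) : Int))) := by
  have hn : n = (N : Int) := by omega
  subst hn
  have hslen : N ≤ (PySem.List.sorted arr (fun x => x) false).length := by
    rw [PySem.List.length_sorted]; omega
  simp only [solution]
  rw [dq_build]
  have e0 : (PySem.List.pyGet? (dqL (PySem.List.sorted arr (fun x => x) false) N) 0).getD 0
      = (PySem.List.sorted arr (fun x => x) false).getD 0 0 := by
    rw [PySem.List.pyGet?_zero, ← List.getD_eq_getElem?_getD, dq_getD _ N 0 (by omega), if_pos (by omega)]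
  have e1 : (PySem.List.pyGet? (dqL (PySem.List.sorted arr (fun x => x) false) N) ((N:Int)-1)).getD 0
      = (PySem.List.sorted arr (fun x => x) false).getD 1 0 := by
    rw [show (N:Int)-1 = ((N-1 : Nat) : Int) by omega, PySem.List.pyGet?_natCast,
      ← List.getD_eq_getElem?_getD, dq_getD _ N (N-1) (by omega), if_neg (by omega)]
    congr 1
    omega
  rw [e0, e1, abs_of_nonpos (by have := sorted_mono arr 0 1 (by omega) (by omega); omega)]
  rw [show -((PySem.List.sorted arr (fun x => x) false).getD 0 0
        - (PySem.List.sorted arr (fun x => x) false).getD 1 0)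
      = (PySem.List.sorted arr (fun x => x) false).getD 1 0
        - (PySem.List.sorted arr (fun x => x) false).getD 0 0 by ring, if_gt_eq_max]
  congr 1
  rw [PySem.List.pyRange_one, show ((N:Int) - 1).toNat = N-1 by omega]
  exact List.map_congr_left (fun k _ => by push_cast; ring)

theorem A_eq (n : Int) (arr : List Int) (N : Nat) (hN : n.toNat = N) (h3 : 3 ≤ N)
    (hlen : n ≤ arr.length)
    (hne : ¬((PySem.List.sorted arr (fun x => x) false).getD 1 0
              = (PySem.List.sorted arr (fun x => x) false).getD 0 0
           ∧ (PySem.List.sorted arr (fun x => x) false).getD 2 0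
              = (PySem.List.sorted arr (fun x => x) false).getD 0 0)) :
    solution n arr = amax (PySem.List.sorted arr (fun x => x) false) N := by
  have hslen : N ≤ (PySem.List.sorted arr (fun x => x) false).length := by
    rw [PySem.List.length_sorted]; omega
  have m01 := sorted_mono arr 0 1 (by omega) (by omega)
  have m12 := sorted_mono arr 1 2 (by omega) (by omega)
  have dq0 : (dqL (PySem.List.sorted arr (fun x => x) false) N).getD 0 0
      = (PySem.List.sorted arr (fun x => x) false).getD 0 0 := by
    rw [dq_getD _ N 0 (by omega), if_pos (by omega)]
  have dq1 : (dqL (PySem.List.sorted arr (fun x => x) false) N).getD 1 0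
      = (PySem.List.sorted arr (fun x => x) false).getD 2 0 := by
    rw [dq_getD _ N 1 (by omega), if_pos (by omega)]
  have hg0 : 0 < (PySem.List.sorted arr (fun x => x) false).getD 2 0
      - (PySem.List.sorted arr (fun x => x) false).getD 0 0 := by
    rcases Decidable.not_and_iff_or_not.mp hne with h | h <;> omega
  have hmax2 : max (max 0 ((PySem.List.sorted arr (fun x => x) false).getD 1 0
          - (PySem.List.sorted arr (fun x => x) false).getD 0 0))
        ((PySem.List.sorted arr (fun x => x) false).getD 2 0
          - (PySem.List.sorted arr (fun x => x) false).getD 0 0)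
      = (PySem.List.sorted arr (fun x => x) false).getD 2 0
          - (PySem.List.sorted arr (fun x => x) false).getD 0 0 := by
    apply max_eq_right
    apply max_le <;> omega
  have hgA0 : gA (PySem.List.sorted arr (fun x => x) false) N 0
      = (PySem.List.sorted arr (fun x => x) false).getD 2 0
        - (PySem.List.sorted arr (fun x => x) false).getD 0 0 := by
    unfold gA
    rw [show (0+1 : Nat) = 1 from rfl, dq1, dq0, abs_of_nonneg (by omega)]
  rw [sol_unfold n arr N hN (by omega) hlen]
  have hpeel : List.range (N-1) = 0 :: (List.range (N-2)).map Nat.succ := by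
    rw [show N-1 = (N-2)+1 by omega, List.range_succ_eq_map]
  rw [hpeel]
  simp only [List.map_cons]
  rw [solutionLoop]
  simp only [PySem.List.pyGet?_natCast,
    show ((1+0 : Nat) : Int) - 1 = ((0 : Nat) : Int) by simp,
    PySem.List.pyGet?_natCast]
  rw [show ((1+0:Nat)) = 1 from rfl]
  rw [← List.getD_eq_getElem?_getD, ← List.getD_eq_getElem?_getD, if_gt_eq_max]
  rw [dq1, dq0, abs_of_nonneg (by omega), hmax2, if_neg (by simpa using hg0.ne')]
  rw [loop_fold _ _ _ hg0]
  unfold amax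
  rw [hpeel, List.foldl_cons, hgA0, hmax2]
  rfl

theorem A_break (n : Int) (arr : List Int) (N : Nat) (hN : n.toNat = N) (h3 : 3 ≤ N)
    (hlen : n ≤ arr.length)
    (e1 : (PySem.List.sorted arr (fun x => x) false).getD 1 0
          = (PySem.List.sorted arr (fun x => x) false).getD 0 0)
    (e2 : (PySem.List.sorted arr (fun x => x) false).getD 2 0
          = (PySem.List.sorted arr (fun x => x) false).getD 0 0) :
    solution n arr = 0 := by
  have hslen : N ≤ (PySem.List.sorted arr (fun x => x) false).length := by
    rw [PySem.List.length_sorted]; omega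
  have dq0 : (dqL (PySem.List.sorted arr (fun x => x) false) N).getD 0 0
      = (PySem.List.sorted arr (fun x => x) false).getD 0 0 := by
    rw [dq_getD _ N 0 (by omega), if_pos (by omega)]
  have dq1 : (dqL (PySem.List.sorted arr (fun x => x) false) N).getD 1 0
      = (PySem.List.sorted arr (fun x => x) false).getD 2 0 := by
    rw [dq_getD _ N 1 (by omega), if_pos (by omega)]
  rw [sol_unfold n arr N hN (by omega) hlen]
  have hpeel : List.range (N-1) = 0 :: (List.range (N-2)).map Nat.succ := by
    rw [show N-1 = (N-2)+1 by omega, List.range_succ_eq_map]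
  rw [hpeel]
  simp only [List.map_cons]
  rw [solutionLoop]
  simp only [PySem.List.pyGet?_natCast,
    show ((1+0 : Nat) : Int) - 1 = ((0 : Nat) : Int) by simp,
    PySem.List.pyGet?_natCast]
  rw [show ((1+0:Nat)) = 1 from rfl]
  rw [← List.getD_eq_getElem?_getD, ← List.getD_eq_getElem?_getD]
  rw [dq1, dq0, e1, e2]
  norm_num

theorem B_eq (n : Int) (arr : List Int) (N : Nat) (hN : n.toNat = N) (h2 : 2 ≤ N)
    (hlen : n ≤ arr.length) :
    solution_alt n arr = bmax (PySem.List.sorted arr (fun x => x) false) N := by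
  have hn : n = (N : Int) := by omega
  subst hn
  simp only [solution_alt]
  rw [if_neg (by omega)]
  have g1 : (PySem.List.pyGet? (PySem.List.sorted arr (fun x => x) false) (1:Int)).getD 0
      = (PySem.List.sorted arr (fun x => x) false).getD 1 0 := by
    rw [show (1:Int) = ((1:Nat):Int) from by norm_num, PySem.List.pyGet?_natCast,
      ← List.getD_eq_getElem?_getD]
  have g0 : (PySem.List.pyGet? (PySem.List.sorted arr (fun x => x) false) (0:Int)).getD 0
      = (PySem.List.sorted arr (fun x => x) false).getD 0 0 := by
    rw [PySem.List.pyGet?_zero, ← List.getD_eq_getElem?_getD]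
  have gN1 : (PySem.List.pyGet? (PySem.List.sorted arr (fun x => x) false) ((N:Int)-1)).getD 0
      = (PySem.List.sorted arr (fun x => x) false).getD (N-1) 0 := by
    rw [show (N:Int)-1 = ((N-1 : Nat) : Int) by omega, PySem.List.pyGet?_natCast,
      ← List.getD_eq_getElem?_getD]
  have gN2 : (PySem.List.pyGet? (PySem.List.sorted arr (fun x => x) false) ((N:Int)-2)).getD 0
      = (PySem.List.sorted arr (fun x => x) false).getD (N-2) 0 := by
    rw [show (N:Int)-2 = ((N-2 : Nat) : Int) by omega, PySem.List.pyGet?_natCast,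
      ← List.getD_eq_getElem?_getD]
  rw [g1, g0, gN1, gN2]
  rw [PySem.List.pyRange_one, show (((N:Int)-2) - 0).toNat = N-2 by omega, List.foldl_map]
  unfold bmax
  refine PySem.List.foldl_congr_mem _ _ _ _ ?_
  intro a k hk
  rw [show (0+(k:Int)) = ((k:Nat):Int) by ring]
  rw [show ((k:Int)+2) = ((k+2:Nat):Int) by push_cast; ring]
  rw [PySem.List.pyGet?_natCast, PySem.List.pyGet?_natCast,
    ← List.getD_eq_getElem?_getD, ← List.getD_eq_getElem?_getD, if_gt_eq_max]
  rfl

theorem bmax_zero (s : List Int) (N : Nat) (h3 : 3 ≤ N)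
    (hall : ∀ k, k < N → s.getD k 0 = s.getD 0 0) :
    bmax s N = 0 := by
  have hb1 : s.getD 1 0 - s.getD 0 0 = 0 := by rw [hall 1 (by omega)]; ring
  have hb2 : s.getD (N-1) 0 - s.getD (N-2) 0 = 0 := by
    rw [hall (N-1) (by omega), hall (N-2) (by omega)]; ring
  unfold bmax
  rw [hb1, hb2]
  apply le_antisymm
  · apply foldl_max_le
    · simp
    · intro k hk
      rw [List.mem_range] at hk
      unfold gapF
      rw [hall (k+2) (by omega), hall k (by omega)]
      omega
  · have := (PySem.List.le_foldl_max_int (List.range (N-2)) (gapF s) (max 0 0)).1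
    simpa using this

theorem caseN1 (n : Int) (arr : List Int) (hn : n = 1) : solution n arr = 0 := by
  subst hn
  simp only [solution]
  rw [show (1:Int)-1 = 0 from by norm_num,
    PySem.List.pyRange_neg_one_cons (by norm_num)]
  rw [show (0:Int)-1 = -1 from by norm_num, PySem.List.pyRange_neg_one_eq_nil (by norm_num)]
  rw [PySem.List.pyRange_one_eq_nil (by norm_num)]
  simp only [List.foldl_cons, List.foldl_nil]
  rw [show (PySem.Int.mod 0 2 == 1) = false from by decide,
    show (PySem.Int.mod 0 2 == 0) = true from by decide]
  simp [solutionLoop]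

theorem caseN2 (n : Int) (arr : List Int) (hN : n.toNat = 2) (hlen : n ≤ arr.length) :
    solution n arr = solution_alt n arr := by
  have hslen : (2:Nat) ≤ (PySem.List.sorted arr (fun x => x) false).length := by
    rw [PySem.List.length_sorted]; omega
  have m01 := sorted_mono arr 0 1 (by omega) (by omega)
  have dq0 : (dqL (PySem.List.sorted arr (fun x => x) false) 2).getD 0 0
      = (PySem.List.sorted arr (fun x => x) false).getD 0 0 := by
    rw [dq_getD _ 2 0 (by omega), if_pos (by omega)]
  have dq1 : (dqL (PySem.List.sorted arr (fun x => x) false) 2).getD 1 0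
      = (PySem.List.sorted arr (fun x => x) false).getD 1 0 := by
    rw [dq_getD _ 2 1 (by omega), if_neg (by omega)]
  rw [sol_unfold n arr 2 hN (by omega) hlen, B_eq n arr 2 hN (by omega) hlen]
  rw [show (2:Nat)-1 = 0+1 from rfl, List.range_succ_eq_map]
  simp only [List.map_cons, List.range_zero, List.map_nil]
  rw [solutionLoop]
  simp only [PySem.List.pyGet?_natCast,
    show ((1+0 : Nat) : Int) - 1 = ((0 : Nat) : Int) by simp,
    PySem.List.pyGet?_natCast]
  rw [show ((1+0:Nat)) = 1 from rfl]
  rw [← List.getD_eq_getElem?_getD, ← List.getD_eq_getElem?_getD]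
  rw [dq1, dq0, abs_of_nonneg (by omega), if_gt_eq_max]
  have hmm : max (max 0 ((PySem.List.sorted arr (fun x => x) false).getD 1 0
        - (PySem.List.sorted arr (fun x => x) false).getD 0 0))
      ((PySem.List.sorted arr (fun x => x) false).getD 1 0
        - (PySem.List.sorted arr (fun x => x) false).getD 0 0)
      = (PySem.List.sorted arr (fun x => x) false).getD 1 0
        - (PySem.List.sorted arr (fun x => x) false).getD 0 0 := by
    apply max_eq_right
    apply max_le <;> omega
  rw [hmm]
  unfold bmax
  rw [show (2:Nat)-2 = 0 from rfl, show (2:Nat)-1 = 1 from rfl]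
  simp only [List.range_zero, List.foldl_nil]
  rw [max_self]
  split <;> simp [solutionLoop]

theorem B_pos (s : List Int) (N : Nat) (h3 : 3 ≤ N) (hslen : N ≤ s.length)
    (hmono : ∀ p q : Nat, p ≤ q → q < s.length → s.getD p 0 ≤ s.getD q 0)
    (e1 : s.getD 1 0 = s.getD 0 0) (e2 : s.getD 2 0 = s.getD 0 0)
    (hex : ∃ k, k < N ∧ s.getD k 0 ≠ s.getD 0 0) :
    0 < bmax s N := by
  have j0spec := Nat.find_spec hex
  set j0 := Nat.find hex with hj0
  have hj3 : 3 ≤ j0 := by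
    by_contra hlt
    rcases (by omega : j0 = 0 ∨ j0 = 1 ∨ j0 = 2) with h | h | h
    · exact j0spec.2 (by rw [h])
    · exact j0spec.2 (by rw [h]; exact e1)
    · exact j0spec.2 (by rw [h]; exact e2)
  have hmin : s.getD (j0-2) 0 = s.getD 0 0 := by
    have := Nat.find_min hex (show j0-2 < j0 by omega)
    by_contra hne
    exact this ⟨by omega, hne⟩
  have hgap : 0 < gapF s (j0-2) := by
    unfold gapF
    rw [show j0-2+2 = j0 by omega, hmin]
    have hle := hmono 0 j0 (by omega) (by omega)
    rcases lt_or_eq_of_le hle with h | h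
    · omega
    · exact absurd h.symm j0spec.2
  have hmem : j0-2 ∈ List.range (N-2) := List.mem_range.mpr (by omega)
  have := (PySem.List.le_foldl_max_int (List.range (N-2)) (gapF s)
      (max (s.getD 1 0 - s.getD 0 0) (s.getD (N-1) 0 - s.getD (N-2) 0))).2 _ hmem
  unfold bmax
  omega

theorem solution_spec : Claim_unchanged_solution := by
  intro n arr _ hpre hnd
  obtain ⟨h1, h2⟩ := hpre
  rcases (by omega : n = 1 ∨ n.toNat = 2 ∨ 3 ≤ n.toNat) with hc | hc | hc
  · subst hc
    rw [caseN1 1 arr rfl]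
    simp [solution_alt]
  · exact caseN2 n arr hc h2
  · have hslen : n.toNat ≤ (PySem.List.sorted arr (fun x => x) false).length := by
      rw [PySem.List.length_sorted]; omega
    by_cases htrip : ((PySem.List.sorted arr (fun x => x) false).getD 1 0
          = (PySem.List.sorted arr (fun x => x) false).getD 0 0
        ∧ (PySem.List.sorted arr (fun x => x) false).getD 2 0
          = (PySem.List.sorted arr (fun x => x) false).getD 0 0)
    · -- the three smallest are equal; as ¬D_solution holds, all n chosen values are equal: both sides are 0
      have hnex : ¬ ∃ k ∈ List.range n.toNat,
          (PySem.List.sorted arr (fun x => x) false).getD k 0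
            ≠ (PySem.List.sorted arr (fun x => x) false).getD 0 0 := by
        intro he
        exact hnd (by unfold D_solution; exact ⟨by omega, h2, htrip.1, htrip.2, he⟩)
      have hall : ∀ k, k < n.toNat →
          (PySem.List.sorted arr (fun x => x) false).getD k 0
            = (PySem.List.sorted arr (fun x => x) false).getD 0 0 := by
        intro k hk
        by_contra hne
        exact hnex ⟨k, List.mem_range.mpr hk, hne⟩
      rw [A_break n arr n.toNat rfl hc h2 htrip.1 htrip.2,
        B_eq n arr n.toNat rfl (by omega) h2, bmax_zero _ _ hc hall]
    · rw [A_eq n arr n.toNat rfl hc h2 htrip, B_eq n arr n.toNat rfl (by omega) h2,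
        amax_eq_bmax _ _ (sorted_mono arr) hslen hc]

theorem solution_changed : Claim_changed_solution := by
  unfold Claim_changed_solution; decide

theorem solution_tight : Claim_exact_solution := by
  intro n arr _ hpre hD
  unfold D_solution at hD
  obtain ⟨h3n, hlen, e1, e2, k, hkmem, hkne⟩ := hD
  have hslen : n.toNat ≤ (PySem.List.sorted arr (fun x => x) false).length := by
    rw [PySem.List.length_sorted]; omega
  have hex : ∃ m, m < n.toNat ∧ (PySem.List.sorted arr (fun x => x) false).getD m 0
      ≠ (PySem.List.sorted arr (fun x => x) false).getD 0 0 :=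
    ⟨k, List.mem_range.mp hkmem, hkne⟩
  have hpos := B_pos (PySem.List.sorted arr (fun x => x) false) n.toNat (by omega) hslen
    (sorted_mono arr) e1 e2 hex
  rw [A_break n arr n.toNat rfl (by omega) hlen e1 e2,
    B_eq n arr n.toNat rfl (by omega) hlen]
  omega
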